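-- pv_equiv track=rewrite | github.com/diegogerwig/advent_of_code | 2025/10/advent_2025_10.py | solve_greedy_fallback
-- ===== SOURCE A (Python) =====
-- def solve_greedy_fallback(target_counts, button_effects):
--     """
--     Greedy algorithm as fallback.
--     Strategy: Repeatedly press the button that helps the most with unsatisfied counters.
--     """
--     n_counters = len(target_counts)
--     n_buttons = len(button_effects)
--
--     remaining = list(target_counts)
--     button_presses = [0] * n_buttons
--
--     max_iterations = sum(target_counts) * 3
--     iteration = 0
--
--     while any(r > 0 for r in remaining) and iteration < max_iterations:
--         iteration += 1
--
--         # Find the counter with largest remaining value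
--         max_remaining = max(remaining)
--         if max_remaining == 0:
--             break
--
--         # Find button that best helps with current state
--         best_button = -1
--         best_score = -1
--
--         for j in range(n_buttons):
--             # Calculate score: how much this button helps
--             score = 0
--             for counter_idx in button_effects[j]:
--                 if 0 <= counter_idx < n_counters and remaining[counter_idx] > 0:
--                     score += min(remaining[counter_idx], 1)
--
--             # Prefer buttons that help multiple counters
--             if score > best_score:
--                 best_score = score
--                 best_button = j
--
--         if best_button == -1 or best_score == 0:
--             # No button helps - might be impossible
--             return None
--
--         # Press the best button
--         button_presses[best_button] += 1
--         for counter_idx in button_effects[best_button]: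
--             if 0 <= counter_idx < n_counters:
--                 remaining[counter_idx] = max(0, remaining[counter_idx] - 1)
--
--     # Check if we found a valid solution
--     if any(r > 0 for r in remaining):
--         return None
--
--     return sum(button_presses)
-- ===== SOURCE B (Python) =====
-- def _valid_counter(eff, n):
--     """Multiplicities of the in-range counters a button touches."""
--     d = {}
--     for c in eff:
--         if 0 <= c < n:
--             d[c] = d.get(c, 0) + 1
--     return d
--
--
-- def solve_greedy_fallback(target_counts, button_effects):
--     """Same greedy, but on precomputed per-button occurrence counts with an
--     inverted counter->buttons index and incrementally maintained scores:
--     a button's score is recomputed only when a counter it touches hits 0."""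
--     n = len(target_counts)
--     m = len(button_effects)
--     max_iter = sum(target_counts) * 3
--     rem = [t if t > 0 else 0 for t in target_counts]
--     occ = [list(_valid_counter(eff, n).items()) for eff in button_effects]
--     touching = {}
--     for j in range(m):
--         for c, _k in occ[j]:
--             touching[c] = touching.get(c, []) + [j]
--
--     def score_of(j):
--         return sum(k for c, k in occ[j] if rem[c] > 0)
--
--     scores = [score_of(j) for j in range(m)]
--     presses = 0
--     it = 0
--     while any(r > 0 for r in rem) and it < max_iter:
--         it += 1
--         best_j, best_s = -1, -1
--         for j in range(m):
--             if scores[j] > best_s: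
--                 best_j, best_s = j, scores[j]
--         if best_s <= 0:
--             return None
--         presses += 1
--         crossed = []
--         for c, k in occ[best_j]:
--             if rem[c] > 0:
--                 v = rem[c] - k if rem[c] > k else 0
--                 rem[c] = v
--                 if v == 0:
--                     crossed.append(c)
--         for c in crossed:
--             for j2 in touching[c]:
--                 scores[j2] = score_of(j2)
--     if any(r > 0 for r in rem):
--         return None
--     return presses
-- ===== Notes on version B (the rewrite author's own statement) =====
-- stated objective: alternative
-- what changed: Instead of rescanning every button's full effect list on every press, B precomputes per-button multiplicity maps of valid counters plus an inverted counter-to-buttons index, maintains button scores incrementally (a score is recomputed only when a counter it touches drops to 0, which happens at most once per counter), and applies a press as one clamped subtraction per distinct counter.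
import Mathlib
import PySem

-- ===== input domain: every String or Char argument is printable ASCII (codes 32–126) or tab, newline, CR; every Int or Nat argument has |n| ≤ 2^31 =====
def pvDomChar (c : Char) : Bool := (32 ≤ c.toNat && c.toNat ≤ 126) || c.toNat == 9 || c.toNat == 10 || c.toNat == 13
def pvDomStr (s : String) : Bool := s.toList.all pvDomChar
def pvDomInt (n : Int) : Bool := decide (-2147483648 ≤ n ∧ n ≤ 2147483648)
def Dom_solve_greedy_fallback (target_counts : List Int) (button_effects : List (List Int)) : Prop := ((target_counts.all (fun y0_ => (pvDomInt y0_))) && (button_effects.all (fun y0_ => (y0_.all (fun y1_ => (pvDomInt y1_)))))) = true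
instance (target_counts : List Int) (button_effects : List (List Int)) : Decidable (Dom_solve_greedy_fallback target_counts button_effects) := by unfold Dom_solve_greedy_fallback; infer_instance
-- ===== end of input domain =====

-- B replaces A's per-iteration rescan of every button's effect list by precomputed
-- per-button multiplicity maps, an inverted counter→buttons index and incrementally
-- maintained scores (a button is rescored only when a counter it touches drops to 0);
-- a genuinely different bookkeeping of the same greedy, with the same return value.


-- ===== PORT A =====
-- score of button j: for c in effects[j]: if 0<=c<n and rem[c]>0: score += min(rem[c],1)
-- (index accesses happen only under the 0<=c<n guard, so List.getD is exact there)
def pvA_score (n : Int) (rem : List Int) (eff : List Int) : Int :=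
  eff.foldl (fun score c =>
    if 0 ≤ c ∧ c < n ∧ 0 < rem.getD c.toNat 0 then score + min (rem.getD c.toNat 0) 1
    else score) 0

-- best_button / best_score scan over range(n_buttons)
def pvA_best (n m : Int) (rem : List Int) (be : List (List Int)) : Int × Int :=
  (PySem.List.pyRange 0 m 1).foldl (fun bb j =>
    let score := pvA_score n rem (be.getD j.toNat [])
    if score > bb.2 then (j, score) else bb) (-1, -1)

-- pressing the best button: for c in effects[b]: if 0<=c<n: rem[c] = max(0, rem[c]-1)
def pvA_press (n : Int) (rem : List Int) (eff : List Int) : List Int :=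
  eff.foldl (fun r c =>
    if 0 ≤ c ∧ c < n then r.set c.toNat (max 0 (r.getD c.toNat 0 - 1)) else r) rem

-- the while loop; fuel = maxIter.toNat mirrors 'iteration < max_iterations' exactly
-- (the loop runs at most maxIter.toNat times since it starts at 0 and grows by 1)
def pvA_loop (n m maxIter : Int) (be : List (List Int)) :
    Nat → List Int → List Int → Int → Option Int
  | 0, rem, presses, _ =>
    if rem.any (fun r => 0 < r) then none else some presses.sum
  | fuel+1, rem, presses, it =>
    if rem.any (fun r => 0 < r) ∧ it < maxIter then
      -- max(remaining) is guarded by 'any r > 0' so the list is nonempty; .getD 0 is exact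
      let maxRem := (PySem.List.max? rem (fun x => x)).getD 0
      if maxRem = 0 then
        (if rem.any (fun r => 0 < r) then none else some presses.sum)
      else
        let bb := pvA_best n m rem be
        if bb.1 = -1 ∨ bb.2 = 0 then none
        else
          pvA_loop n m maxIter be fuel (pvA_press n rem (be.getD bb.1.toNat []))
            (presses.set bb.1.toNat (presses.getD bb.1.toNat 0 + 1)) (it + 1)
    else if rem.any (fun r => 0 < r) then none else some presses.sum

def solve_greedy_fallback (target_counts : List Int) (button_effects : List (List Int)) : Option Int :=
  let n : Int := target_counts.length
  let m : Int := button_effects.length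
  let maxIter : Int := target_counts.sum * 3
  pvA_loop n m maxIter button_effects maxIter.toNat target_counts
    (List.replicate button_effects.length 0) 0

-- ===== PORT B =====
-- _valid_counter(eff, n): multiplicities of in-range counters (a Python dict)
def pvB_occ1 (n : Int) (eff : List Int) : PySem.Dict Int Int :=
  eff.foldl (fun d c => if 0 ≤ c ∧ c < n then d.insert c (d.getD c 0 + 1) else d)
    PySem.Dict.empty

-- score_of(j) = sum(k for c, k in occ[j] if rem[c] > 0)
def pvB_score (occ : List (List (Int × Int))) (rem : List Int) (j : Int) : Int :=
  (occ.getD j.toNat []).foldl (fun s ck =>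
    if 0 < rem.getD ck.1.toNat 0 then s + ck.2 else s) 0

-- touching: for j in range(m): for (c,_) in occ[j]: touching[c] = touching.get(c,[])+[j]
def pvB_touch (m : Int) (occ : List (List (Int × Int))) : PySem.Dict Int (List Int) :=
  (PySem.List.pyRange 0 m 1).foldl (fun t j =>
    (occ.getD j.toNat []).foldl (fun t ck => t.modify ck.1 [] (fun l => l ++ [j])) t)
    PySem.Dict.empty

-- press: update rem per distinct counter and collect the counters that crossed to 0
def pvB_pressRem (ob : List (Int × Int)) (rem : List Int) : List Int × List Int :=
  ob.foldl (fun rc ck =>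
    if 0 < rc.1.getD ck.1.toNat 0 then
      let v := if ck.2 < rc.1.getD ck.1.toNat 0 then rc.1.getD ck.1.toNat 0 - ck.2 else 0
      (rc.1.set ck.1.toNat v, if v = 0 then rc.2 ++ [ck.1] else rc.2)
    else rc) (rem, [])

-- for c in crossed: for j2 in touching[c]: scores[j2] = score_of(j2)
def pvB_rescore (occ : List (List (Int × Int))) (touching : PySem.Dict Int (List Int))
    (crossed : List Int) (rem : List Int) (scores : List Int) : List Int :=
  crossed.foldl (fun sc c =>
    (touching.getD c []).foldl (fun sc j2 => sc.set j2.toNat (pvB_score occ rem j2)) sc)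
    scores

def pvB_best (m : Int) (scores : List Int) : Int × Int :=
  (PySem.List.pyRange 0 m 1).foldl (fun bb j =>
    if scores.getD j.toNat 0 > bb.2 then (j, scores.getD j.toNat 0) else bb) (-1, -1)

def pvB_loop (m maxIter : Int) (occ : List (List (Int × Int)))
    (touching : PySem.Dict Int (List Int)) :
    Nat → List Int → List Int → Int → Int → Option Int
  | 0, rem, _, presses, _ => if rem.any (fun r => 0 < r) then none else some presses
  | fuel+1, rem, scores, presses, it =>
    if rem.any (fun r => 0 < r) ∧ it < maxIter then
      let bb := pvB_best m scores
      if bb.2 ≤ 0 then none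
      else
        let rc := pvB_pressRem (occ.getD bb.1.toNat []) rem
        pvB_loop m maxIter occ touching fuel rc.1
          (pvB_rescore occ touching rc.2 rc.1 scores) (presses + 1) (it + 1)
    else if rem.any (fun r => 0 < r) then none else some presses

def solve_greedy_fallback_alt (target_counts : List Int) (button_effects : List (List Int)) : Option Int :=
  let n : Int := target_counts.length
  let m : Int := button_effects.length
  let maxIter : Int := target_counts.sum * 3
  let rem0 := target_counts.map (fun t => if 0 < t then t else 0)
  let occ := button_effects.map (fun eff => (pvB_occ1 n eff).items)
  let touching := pvB_touch m occ
  let scores0 := (PySem.List.pyRange 0 m 1).map (pvB_score occ rem0)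
  pvB_loop m maxIter occ touching maxIter.toNat rem0 scores0 0 0

-- ===== PRECONDITION & SPEC =====
def Spec_solve_greedy_fallback (target_counts : List Int) (button_effects : List (List Int)) (out : Option Int) : Prop := out = solve_greedy_fallback_alt target_counts button_effects
instance (target_counts : List Int) (button_effects : List (List Int)) (out : Option Int) : Decidable (Spec_solve_greedy_fallback target_counts button_effects out) := by unfold Spec_solve_greedy_fallback; infer_instance

-- ===== CLAIM (what is proved, stated in full; the proofs are below) =====
def Claim_equal_solve_greedy_fallback : Prop := ∀ (target_counts : List Int) (button_effects : List (List Int)), Dom_solve_greedy_fallback target_counts button_effects → Spec_solve_greedy_fallback target_counts button_effects (solve_greedy_fallback target_counts button_effects)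

-- ===== LEMMAS AND PROOFS =====

-- proof-side abbreviations
def pvClamp (t : Int) : Int := if 0 < t then t else 0
def pvLv (n : Int) (eff : List Int) : List Int := eff.filter (fun c => decide (0 ≤ c ∧ c < n))
def pvDec (y : Int) : Int := max 0 (y - 1)
def pvOcc (n : Int) (be : List (List Int)) : List (List (Int × Int)) :=
  be.map (fun eff => (pvB_occ1 n eff).items)
def pvScores (n : Int) (m : Int) (rem : List Int) (be : List (List Int)) : List Int :=
  (PySem.List.pyRange 0 m 1).map (fun j => pvA_score n rem (be.getD j.toNat []))

-- (C1) the dict built by _valid_counter is the counter of the valid-filtered effect list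
theorem pv_occ1_items (n : Int) (eff : List Int) :
    (pvB_occ1 n eff).items
      = (PySem.Set.ofList (pvLv n eff)).map (fun c => (c, ((pvLv n eff).count c : Int))) := by
  unfold pvB_occ1 pvLv
  rw [PySem.List.foldl_ite_eq_foldl_filter (p := fun c => 0 ≤ c ∧ c < n)
        (f := fun (d : PySem.Dict Int Int) c => d.insert c (d.getD c 0 + 1)),
      PySem.Dict.foldl_insert_getD_add_one_eq_counter, PySem.Dict.items_counter]


-- (C2) A's score is a countP over the valid-filtered effect list
theorem pv_scoreA_eq (n : Int) (rem : List Int) (eff : List Int) :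
    pvA_score n rem eff
      = ((pvLv n eff).countP (fun c => decide (0 < rem.getD c.toNat 0)) : Int) := by
  unfold pvA_score
  rw [PySem.List.foldl_congr_mem _ _
        (fun s c => if 0 ≤ c ∧ c < n ∧ 0 < rem.getD c.toNat 0 then s + 1 else s) _
        (by
          intro acc x _
          by_cases h : 0 ≤ x ∧ x < n ∧ 0 < rem.getD x.toNat 0
          · simp only [if_pos h]
            have := h.2.2
            omega
          · simp only [if_neg h])]
  rw [PySem.List.foldl_ite_add_one]
  unfold pvLv
  rw [List.countP_filter, zero_add]
  norm_cast
  apply List.countP_congr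
  intro x _
  by_cases h1 : 0 ≤ x <;> by_cases h2 : x < n <;> simp [h1, h2]

-- (C4) grouping identity: summing multiplicities over the distinct elements is countP
theorem pv_group_count (L : List Int) (p : Int → Bool) :
    (((PySem.Set.ofList L).filter p).map (fun c => (L.count c : Int))).sum
      = (L.countP p : Int) := by
  have hperm : List.Perm (PySem.Set.ofList L) L.dedup := by
    rw [List.perm_ext_iff_of_nodup (PySem.Set.nodup_ofList L) L.nodup_dedup]
    intro a; rw [PySem.Set.mem_ofList, List.mem_dedup]
  have h1 : (((PySem.Set.ofList L).filter p).map (fun c => (L.count c : Int))).sum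
      = ((L.dedup.filter p).map (fun c => (L.count c : Int))).sum :=
    ((hperm.filter p).map _).sum_eq
  rw [h1]
  have h2 := List.sum_map_count_dedup_filter_eq_countP p L
  have h3 : ((L.dedup.filter p).map (fun c => (L.count c : Int))).sum
      = (((L.dedup.filter p).map (fun c => L.count c)).sum : Int) := by
    rw [Nat.cast_list_sum, List.map_map]; rfl
  rw [h3, h2]


theorem pv_occ_getD (n : Int) (be : List (List Int)) (j : Nat) (hj : j < be.length) :
    (pvOcc n be).getD j [] = (pvB_occ1 n (be.getD j [])).items := by
  unfold pvOcc
  simp [List.getD_eq_getElem?_getD, List.getElem?_eq_getElem hj]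

-- (C5) B's score equals A's score when rem_B is the clamped rem_A
theorem pv_score_bridge (n : Int) (be : List (List Int)) (rem : List Int)
    (hn : (rem.length : Int) = n) (j : Int) (h0 : 0 ≤ j) (hj : j < (be.length : Int)) :
    pvB_score (pvOcc n be) (rem.map pvClamp) j = pvA_score n rem (be.getD j.toNat []) := by
  have hj' : j.toNat < be.length := by omega
  unfold pvB_score
  rw [pv_occ_getD n be j.toNat hj']
  rw [pv_occ1_items]
  rw [List.foldl_map]
  rw [PySem.List.foldl_ite_eq_foldl_filter
        (p := fun c => 0 < (rem.map pvClamp).getD c.toNat 0)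
        (f := fun (s : Int) c => s + ((pvLv n (be.getD j.toNat [])).count c : Int))]
  rw [PySem.List.foldl_add, zero_add, pv_group_count, pv_scoreA_eq]
  congr 1
  apply List.countP_congr
  intro c hc
  have hcv : 0 ≤ c ∧ c < n := by
    have := List.mem_filter.1 hc
    simpa using this.2
  have hlt : c.toNat < rem.length := by omega
  have hmap : (rem.map pvClamp).getD c.toNat 0 = pvClamp (rem.getD c.toNat 0) := by
    simp [List.getD_eq_getElem?_getD, List.getElem?_map, List.getElem?_eq_getElem hlt]
  rw [hmap]
  simp only [decide_eq_true_eq, pvClamp]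
  split_ifs with hs <;> omega


-- getD on a map over range
theorem pv_getD_map_pyRange (f : Int → Int) (m j : Int) (h0 : 0 ≤ j) (hj : j < m) :
    ((PySem.List.pyRange 0 m 1).map f).getD j.toNat 0 = f j := by
  rw [PySem.List.pyRange_one, List.map_map]
  have hlt : j.toNat < (m - 0).toNat := by omega
  rw [List.getD_eq_getElem?_getD, List.getElem?_map, List.getElem?_range hlt]
  simp [Int.toNat_of_nonneg h0]


-- (C6) the argmax scans agree
theorem pv_best_bridge (n : Int) (be : List (List Int)) (rem : List Int) :
    pvB_best (be.length : Int) (pvScores n (be.length : Int) rem be)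
      = pvA_best n (be.length : Int) rem be := by
  unfold pvB_best pvA_best pvScores
  apply PySem.List.foldl_congr_mem
  intro acc x hx
  have hbx := PySem.List.mem_pyRange_one.1 hx
  rw [pv_getD_map_pyRange _ _ _ hbx.1 hbx.2]


-- (C7) the running-max fold returns its init or a member with its score
theorem pv_best_cases (l : List Int) (f : Int → Int) (init : Int × Int) :
    l.foldl (fun bb j => if f j > bb.2 then (j, f j) else bb) init = init
      ∨ ∃ j ∈ l, l.foldl (fun bb j => if f j > bb.2 then (j, f j) else bb) init = (j, f j) := by
  induction l generalizing init with
  | nil => left; rfl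
  | cons x t ih =>
    simp only [List.foldl_cons]
    by_cases h : f x > init.2
    · simp only [if_pos h]
      rcases ih (x, f x) with h1 | ⟨j, hj, h2⟩
      · right; exact ⟨x, List.mem_cons_self, h1⟩
      · right; exact ⟨j, List.mem_cons_of_mem _ hj, h2⟩
    · simp only [if_neg h]
      rcases ih init with h1 | ⟨j, hj, h2⟩
      · left; exact h1
      · right; exact ⟨j, List.mem_cons_of_mem _ hj, h2⟩


-- (C8) scores are nonnegative
theorem pv_scoreA_nonneg (n : Int) (rem : List Int) (eff : List Int) :
    0 ≤ pvA_score n rem eff := by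
  rw [pv_scoreA_eq]; positivity


-- (C10) clamping does not change positivity tests
theorem pv_any_clamp (rem : List Int) :
    (rem.map pvClamp).any (fun r => 0 < r) = rem.any (fun r => 0 < r) := by
  rw [List.any_map]
  congr 1
  funext x
  simp only [Function.comp_apply, pvClamp]
  by_cases h : 0 < x <;> simp [h]


-- (C11) under 'any r > 0' the maximum is nonzero
theorem pv_maxRem_ne (rem : List Int) (h : rem.any (fun r => 0 < r) = true) :
    ¬ ((PySem.List.max? rem (fun x => x)).getD 0 = 0) := by
  rw [List.any_eq_true] at h
  obtain ⟨x, hx, hxpos⟩ := h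
  simp only [decide_eq_true_eq] at hxpos
  cases hmax : PySem.List.max? rem (fun x => x) with
  | none =>
    rw [PySem.List.max?_eq_none_iff] at hmax
    subst hmax; simp at hx
  | some v =>
    have := PySem.List.max?_isMax hmax x hx
    simp only [Option.getD_some]
    omega

theorem pv_length_pressA (n : Int) (rem eff : List Int) :
    (pvA_press n rem eff).length = rem.length := by
  unfold pvA_press
  induction eff generalizing rem with
  | nil => rfl
  | cons c t ih =>
    simp only [List.foldl_cons]
    by_cases h : 0 ≤ c ∧ c < n
    · rw [if_pos h, ih]; exact List.length_set ..
    · rw [if_neg h, ih]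


-- (C12) pointwise effect of A's press: index i is decremented-and-clamped once per occurrence
theorem pv_pressA_getElem (n : Int) (eff : List Int) (rem : List Int)
    (hn : (rem.length : Int) = n) (i : Nat) :
    (pvA_press n rem eff)[i]? = rem[i]?.map (pvDec^[(pvLv n eff).count (i : Int)]) := by
  unfold pvA_press pvLv
  induction eff generalizing rem with
  | nil => simp
  | cons c t ih =>
    simp only [List.foldl_cons]
    by_cases h : 0 ≤ c ∧ c < n
    · rw [if_pos h, List.filter_cons_of_pos (by simp [h])]
      have hlen' : ((rem.set c.toNat (max 0 (rem.getD c.toNat 0 - 1))).length : Int) = n := by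
        rw [List.length_set]; exact hn
      rw [ih _ hlen']
      by_cases hc : c = (i : Int)
      · have htn : c.toNat = i := by omega
        have hcnt : ∀ L : List Int, (c :: L).count (i : Int) = L.count (i : Int) + 1 := by
          intro L; rw [hc]; exact List.count_cons_self ..
        rw [hcnt]
        cases hx : rem[i]? with
        | none =>
          have hge : rem.length ≤ i := List.getElem?_eq_none_iff.1 hx
          have hset : (rem.set c.toNat (max 0 (rem.getD c.toNat 0 - 1)))[i]? = none :=
            List.getElem?_eq_none_iff.2 (by simp [hge])
          rw [hset]
          simp
        | some x =>
          have hilt : i < rem.length := by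
            by_contra hcon
            have hnone : rem[i]? = none := List.getElem?_eq_none_iff.2 (by omega)
            rw [hx] at hnone
            simp at hnone
          have hgd : rem.getD c.toNat 0 = x := by
            rw [htn, List.getD_eq_getElem?_getD, hx]; rfl
          have hset : (rem.set c.toNat (max 0 (rem.getD c.toNat 0 - 1)))[i]? = some (pvDec x) := by
            rw [List.getElem?_set, if_pos htn, if_pos (by omega), hgd]
            rfl
          rw [hset]
          simp only [Option.map_some]
          rw [Function.iterate_succ_apply]
      · have htn : c.toNat ≠ i := by omega
        have hset : (rem.set c.toNat (max 0 (rem.getD c.toNat 0 - 1)))[i]? = rem[i]? := by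
          rw [List.getElem?_set, if_neg htn]
        rw [hset, List.count_cons_of_ne (by omega)]
    · rw [if_neg h, List.filter_cons_of_neg (by simp [h]), ih _ hn]


-- (C13) closed form of the iterated clamped decrement
theorem pv_decIter_eq (K : Nat) (hK : 1 ≤ K) (x : Int) :
    pvDec^[K] x = max 0 (x - K) := by
  induction K generalizing x with
  | zero => omega
  | succ k ih =>
    rw [Function.iterate_succ_apply]
    by_cases hk : k = 0
    · subst hk
      simp only [Function.iterate_zero, id_eq, pvDec]
      push_cast; ring_nf
    · rw [ih (by omega)]
      simp only [pvDec]
      push_cast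
      omega

theorem pv_decIter_pos (K : Nat) (x : Int) (h : 0 < pvDec^[K] x) : 0 < x := by
  induction K generalizing x with
  | zero => simpa using h
  | succ k ih =>
    rw [Function.iterate_succ_apply] at h
    have := ih _ h
    simp only [pvDec] at this
    omega


-- (C14) B's press fold, characterised pointwise together with its crossed list
theorem pv_pressB_spec (ob : List (Int × Int)) (rem acc : List Int)
    (hnd : (ob.map Prod.fst).Nodup)
    (hb : ∀ p ∈ ob, 0 ≤ p.1 ∧ p.1 < (rem.length : Int)) :
    (ob.foldl (fun rc ck =>
        if 0 < rc.1.getD ck.1.toNat 0 then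
          let v := if ck.2 < rc.1.getD ck.1.toNat 0 then rc.1.getD ck.1.toNat 0 - ck.2 else 0
          (rc.1.set ck.1.toNat v, if v = 0 then rc.2 ++ [ck.1] else rc.2)
        else rc) (rem, acc)).1.length = rem.length
    ∧ (∀ i : Nat, (i : Int) ∉ ob.map Prod.fst →
        (ob.foldl (fun rc ck =>
          if 0 < rc.1.getD ck.1.toNat 0 then
            let v := if ck.2 < rc.1.getD ck.1.toNat 0 then rc.1.getD ck.1.toNat 0 - ck.2 else 0
            (rc.1.set ck.1.toNat v, if v = 0 then rc.2 ++ [ck.1] else rc.2)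
          else rc) (rem, acc)).1[i]? = rem[i]?)
    ∧ (∀ c k, (c, k) ∈ ob →
        (ob.foldl (fun rc ck =>
          if 0 < rc.1.getD ck.1.toNat 0 then
            let v := if ck.2 < rc.1.getD ck.1.toNat 0 then rc.1.getD ck.1.toNat 0 - ck.2 else 0
            (rc.1.set ck.1.toNat v, if v = 0 then rc.2 ++ [ck.1] else rc.2)
          else rc) (rem, acc)).1[c.toNat]?
          = rem[c.toNat]?.map (fun x => if 0 < x then (if k < x then x - k else 0) else x))
    ∧ (ob.foldl (fun rc ck =>
        if 0 < rc.1.getD ck.1.toNat 0 then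
          let v := if ck.2 < rc.1.getD ck.1.toNat 0 then rc.1.getD ck.1.toNat 0 - ck.2 else 0
          (rc.1.set ck.1.toNat v, if v = 0 then rc.2 ++ [ck.1] else rc.2)
        else rc) (rem, acc)).2
        = acc ++ (ob.filter (fun ck =>
            decide (0 < rem.getD ck.1.toNat 0) && decide (rem.getD ck.1.toNat 0 ≤ ck.2))).map Prod.fst := by
  induction ob generalizing rem acc with
  | nil =>
    refine ⟨rfl, fun i _ => rfl, fun c k h => absurd h List.not_mem_nil, by simp⟩
  | cons hd tl ih =>
    have hb0 := hb hd List.mem_cons_self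
    have hnd1 : hd.1 ∉ tl.map Prod.fst := (List.nodup_cons.1 hnd).1
    have hndt : (tl.map Prod.fst).Nodup := (List.nodup_cons.1 hnd).2
    simp only [List.foldl_cons]
    by_cases hpos : 0 < rem.getD hd.1.toNat 0
    · rw [if_pos hpos]
      set x := rem.getD hd.1.toNat 0 with hx
      set v : Int := if hd.2 < x then x - hd.2 else 0 with hv
      set rem' := rem.set hd.1.toNat v with hrem'
      set acc' := if v = 0 then acc ++ [hd.1] else acc with hacc' 
      have hlen' : rem'.length = rem.length := by rw [hrem']; exact List.length_set ..
      have hbt : ∀ p ∈ tl, 0 ≤ p.1 ∧ p.1 < (rem'.length : Int) := by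
        intro p hp
        have := hb p (List.mem_cons_of_mem _ hp)
        omega
      obtain ⟨iha, ihb, ihc, ihd⟩ := ih rem' acc' hndt hbt
      have hgetne : ∀ i : Nat, hd.1.toNat ≠ i → rem'[i]? = rem[i]? := by
        intro i hne
        rw [hrem', List.getElem?_set, if_neg hne]
      refine ⟨by rw [iha, hlen'], ?_, ?_, ?_⟩
      · intro i hi
        have hne : (i : Int) ≠ hd.1 := by
          intro hmm; exact hi (by rw [List.map_cons, hmm]; exact List.mem_cons_self)
        have hit : (i : Int) ∉ tl.map Prod.fst := by
          intro hmm; exact hi (List.mem_cons_of_mem _ hmm)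
        rw [ihb i hit, hgetne i (by omega)]
      · intro c k hck
        rcases List.mem_cons.1 hck with heq | htl
        · have hc1 : c = hd.1 := congrArg Prod.fst heq
          have hk1 : k = hd.2 := congrArg Prod.snd heq
          have hcn : c.toNat = hd.1.toNat := by rw [hc1]
          have hknotin : hd.1 ∉ tl.map Prod.fst := hnd1
          have hres := ihb hd.1.toNat (by
            intro hmm; exact hknotin (by
              have : (hd.1.toNat : Int) = hd.1 := by omega
              rwa [this] at hmm))
          rw [hcn, hres]
          have hin : hd.1.toNat < rem.length := by omega
          have hsome : rem[hd.1.toNat]? = some x := by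
            rw [hx, List.getD_eq_getElem?_getD, List.getElem?_eq_getElem hin]; rfl
          rw [hrem', List.getElem?_set, if_pos rfl, if_pos hin, hsome]
          simp only [Option.map_some, hk1, hv]
          rw [if_pos hpos]
        · have hcne : c ≠ hd.1 := by
            intro hmm
            exact hnd1 (hmm ▸ List.mem_map.2 ⟨(c, k), htl, rfl⟩)
          have hcb := hb (c, k) (List.mem_cons_of_mem _ htl)
          have hgd : rem'[c.toNat]? = rem[c.toNat]? := hgetne c.toNat (by
            simp only at hcb
            omega)
          rw [ihc c k htl, hgd]
      · rw [ihd]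
        have hfilter : tl.filter (fun ck =>
            decide (0 < rem'.getD ck.1.toNat 0) && decide (rem'.getD ck.1.toNat 0 ≤ ck.2))
            = tl.filter (fun ck =>
            decide (0 < rem.getD ck.1.toNat 0) && decide (rem.getD ck.1.toNat 0 ≤ ck.2)) := by
          apply List.filter_congr
          intro p hp
          have hpne : p.1 ≠ hd.1 := by
            intro hmm
            exact hnd1 (hmm ▸ List.mem_map.2 ⟨p, hp, rfl⟩)
          have hpb := hb p (List.mem_cons_of_mem _ hp)
          have : rem'.getD p.1.toNat 0 = rem.getD p.1.toNat 0 := by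
            rw [List.getD_eq_getElem?_getD, List.getD_eq_getElem?_getD,
                hgetne p.1.toNat (by omega)]
          rw [this]
        rw [hfilter]
        have hcv : (decide (0 < rem.getD hd.1.toNat 0)
            && decide (rem.getD hd.1.toNat 0 ≤ hd.2)) = decide (v = 0) := by
          have h1 : decide (0 < rem.getD hd.1.toNat 0) = true := decide_eq_true hpos
          rw [h1, Bool.true_and, decide_eq_decide, hv, hx]
          split_ifs with h2 <;> omega
        simp only [List.filter_cons, hcv]
        by_cases hvz : v = 0
        · simp [hvz, hacc']
        · simp [hvz, hacc']
    · rw [if_neg hpos]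
      have hbt : ∀ p ∈ tl, 0 ≤ p.1 ∧ p.1 < (rem.length : Int) :=
        fun p hp => hb p (List.mem_cons_of_mem _ hp)
      obtain ⟨iha, ihb, ihc, ihd⟩ := ih rem acc hndt hbt
      refine ⟨iha, ?_, ?_, ?_⟩
      · intro i hi
        exact ihb i (fun hmm => hi (List.mem_cons_of_mem _ hmm))
      · intro c k hck
        rcases List.mem_cons.1 hck with heq | htl
        · have hc1 : c = hd.1 := congrArg Prod.fst heq
          have hcn : c.toNat = hd.1.toNat := by rw [hc1]
          have hres := ihb hd.1.toNat (by
            intro hmm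
            exact hnd1 (by
              have : (hd.1.toNat : Int) = hd.1 := by omega
              rwa [this] at hmm))
          rw [hcn, hres]
          have hin : hd.1.toNat < rem.length := by omega
          have hsome : rem[hd.1.toNat]? = some (rem.getD hd.1.toNat 0) := by
            rw [List.getD_eq_getElem?_getD, List.getElem?_eq_getElem hin]; rfl
          rw [hsome]
          simp only [Option.map_some]
          rw [if_neg hpos]
        · exact ihc c k htl
      · rw [ihd]
        simp only [List.filter_cons, decide_eq_true_eq, Bool.and_eq_true]
        rw [if_neg (by
          rw [List.getD_eq_getElem?_getD] at hpos
          exact fun hcc => hpos hcc.1)]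


-- (C15a) B's press produces the clamp of A's press
theorem pv_press_bridge (n : Int) (be : List (List Int)) (b : Int)
    (h0 : 0 ≤ b) (hb : b < (be.length : Int)) (rem : List Int) (hn : (rem.length : Int) = n) :
    (pvB_pressRem ((pvOcc n be).getD b.toNat []) (rem.map pvClamp)).1
      = (pvA_press n rem (be.getD b.toNat [])).map pvClamp := by
  have hj' : b.toNat < be.length := by omega
  have hob : (pvOcc n be).getD b.toNat []
      = (PySem.Set.ofList (pvLv n (be.getD b.toNat []))).map
          (fun c => (c, ((pvLv n (be.getD b.toNat [])).count c : Int))) := by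
    rw [pv_occ_getD n be b.toNat hj', pv_occ1_items]
  have hkeys : ((pvOcc n be).getD b.toNat []).map Prod.fst
      = PySem.Set.ofList (pvLv n (be.getD b.toNat [])) := by
    rw [hob, List.map_map]
    have hid : (Prod.fst ∘ fun c : Int => (c, ((pvLv n (be.getD b.toNat [])).count c : Int))) = id := rfl
    rw [hid, List.map_id]
  have hnd : (((pvOcc n be).getD b.toNat []).map Prod.fst).Nodup := by
    rw [hkeys]; exact PySem.Set.nodup_ofList _
  have hbnd : ∀ p ∈ (pvOcc n be).getD b.toNat [], 0 ≤ p.1 ∧ p.1 < ((rem.map pvClamp).length : Int) := by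
    intro p hp
    have hp1 : p.1 ∈ ((pvOcc n be).getD b.toNat []).map Prod.fst := List.mem_map.2 ⟨p, hp, rfl⟩
    rw [hkeys, PySem.Set.mem_ofList] at hp1
    have := List.mem_filter.1 hp1
    have hcv : 0 ≤ p.1 ∧ p.1 < n := by simpa using this.2
    rw [List.length_map]
    omega
  obtain ⟨hlenf, hout, hin, hcr⟩ := pv_pressB_spec ((pvOcc n be).getD b.toNat []) (rem.map pvClamp) [] hnd hbnd
  unfold pvB_pressRem
  apply List.ext_getElem?
  intro i
  rw [List.getElem?_map, pv_pressA_getElem n _ rem hn i, Option.map_map]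
  by_cases hmem : (i : Int) ∈ PySem.Set.ofList (pvLv n (be.getD b.toNat []))
  · have hK : (pvLv n (be.getD b.toNat [])).count (i : Int) ≠ 0 := by
      rw [PySem.Set.mem_ofList] at hmem
      have := List.count_pos_iff.2 hmem
      omega
    have hmemob : ((i : Int), ((pvLv n (be.getD b.toNat [])).count (i : Int) : Int))
        ∈ (pvOcc n be).getD b.toNat [] := by
      rw [hob]; exact List.mem_map.2 ⟨(i : Int), hmem, rfl⟩
    have := hin _ _ hmemob
    have htn : ((i : Int)).toNat = i := Int.toNat_natCast i
    rw [htn] at this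
    rw [this, List.getElem?_map, Option.map_map]
    cases hx : rem[i]? with
    | none => simp
    | some x =>
      simp only [Option.map_some, Function.comp_apply]
      congr 1
      rw [pv_decIter_eq _ (Nat.one_le_iff_ne_zero.2 hK)]
      simp only [pvClamp]
      split_ifs <;> omega
  · have hK : (pvLv n (be.getD b.toNat [])).count (i : Int) = 0 :=
      List.count_eq_zero.2 (fun hmm => hmem (PySem.Set.mem_ofList _ _ |>.2 hmm))
    have hnk : (i : Int) ∉ ((pvOcc n be).getD b.toNat []).map Prod.fst := by
      rw [hkeys]; exact hmem
    rw [hout i hnk, hK, List.getElem?_map]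
    simp


-- (C15b) every counter whose positivity flag drops is collected in crossed
theorem pv_crossed_cover (n : Int) (be : List (List Int)) (b : Int)
    (h0 : 0 ≤ b) (hb : b < (be.length : Int)) (rem : List Int) (hn : (rem.length : Int) = n)
    (i : Nat) (hi : i < rem.length)
    (hpos : 0 < rem.getD i 0)
    (hdrop : ¬ 0 < (pvA_press n rem (be.getD b.toNat [])).getD i 0) :
    (i : Int) ∈ (pvB_pressRem ((pvOcc n be).getD b.toNat []) (rem.map pvClamp)).2 := by
  have hj' : b.toNat < be.length := by omega
  have hob : (pvOcc n be).getD b.toNat []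
      = (PySem.Set.ofList (pvLv n (be.getD b.toNat []))).map
          (fun c => (c, ((pvLv n (be.getD b.toNat [])).count c : Int))) := by
    rw [pv_occ_getD n be b.toNat hj', pv_occ1_items]
  have hkeys : ((pvOcc n be).getD b.toNat []).map Prod.fst
      = PySem.Set.ofList (pvLv n (be.getD b.toNat [])) := by
    rw [hob, List.map_map]
    have hid : (Prod.fst ∘ fun c : Int => (c, ((pvLv n (be.getD b.toNat [])).count c : Int))) = id := rfl
    rw [hid, List.map_id]
  have hnd : (((pvOcc n be).getD b.toNat []).map Prod.fst).Nodup := by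
    rw [hkeys]; exact PySem.Set.nodup_ofList _
  have hbnd : ∀ p ∈ (pvOcc n be).getD b.toNat [], 0 ≤ p.1 ∧ p.1 < ((rem.map pvClamp).length : Int) := by
    intro p hp
    have hp1 : p.1 ∈ ((pvOcc n be).getD b.toNat []).map Prod.fst := List.mem_map.2 ⟨p, hp, rfl⟩
    rw [hkeys, PySem.Set.mem_ofList] at hp1
    have := List.mem_filter.1 hp1
    have hcv : 0 ≤ p.1 ∧ p.1 < n := by simpa using this.2
    rw [List.length_map]
    omega
  obtain ⟨hlenf, hout, hin, hcr⟩ := pv_pressB_spec ((pvOcc n be).getD b.toNat []) (rem.map pvClamp) [] hnd hbnd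
  unfold pvB_pressRem
  rw [hcr, List.nil_append]
  set L := pvLv n (be.getD b.toNat []) with hL
  have hgA := pv_pressA_getElem n (be.getD b.toNat []) rem hn i
  have hsome : rem[i]? = some (rem.getD i 0) := by
    rw [List.getD_eq_getElem?_getD, List.getElem?_eq_getElem hi]; rfl
  rw [hsome] at hgA
  have hval : (pvA_press n rem (be.getD b.toNat [])).getD i 0
      = pvDec^[L.count (i : Int)] (rem.getD i 0) := by
    rw [List.getD_eq_getElem?_getD, hgA]; rfl
  rw [hval] at hdrop
  have hK : L.count (i : Int) ≠ 0 := by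
    intro h0
    rw [h0] at hdrop
    simp only [Function.iterate_zero, id_eq] at hdrop
    exact hdrop hpos
  have hmemL : (i : Int) ∈ L := List.count_pos_iff.1 (Nat.pos_of_ne_zero hK)
  have hle : rem.getD i 0 ≤ (L.count (i : Int) : Int) := by
    rw [pv_decIter_eq _ (Nat.one_le_iff_ne_zero.2 hK)] at hdrop
    omega
  have hgB : (rem.map pvClamp).getD ((i : Int)).toNat 0 = rem.getD i 0 := by
    rw [Int.toNat_natCast, List.getD_eq_getElem?_getD, List.getD_eq_getElem?_getD,
        List.getElem?_map, List.getElem?_eq_getElem hi]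
    simp only [Option.map_some, Option.getD_some, pvClamp]
    have hpos' : 0 < rem[i] := by
      have hh := hpos
      rw [List.getD_eq_getElem?_getD, List.getElem?_eq_getElem hi] at hh
      simpa using hh
    rw [if_pos hpos']
  apply List.mem_map.2
  refine ⟨((i : Int), (L.count (i : Int) : Int)), List.mem_filter.2 ⟨?_, ?_⟩, rfl⟩
  · rw [hob]
    exact List.mem_map.2 ⟨(i : Int), PySem.Set.mem_ofList _ _ |>.2 hmemL, rfl⟩
  · simp only [hgB]
    rw [Bool.and_eq_true, decide_eq_true_eq, decide_eq_true_eq]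
    exact ⟨hpos, hle⟩


-- (C16) membership in the inverted index
theorem pv_mem_touch (m : Int) (occ : List (List (Int × Int))) (c j : Int) :
    j ∈ (pvB_touch m occ).getD c []
      ↔ (0 ≤ j ∧ j < m ∧ ∃ k, (c, k) ∈ occ.getD j.toNat []) := by
  unfold pvB_touch
  rw [PySem.List.foldl_congr_mem _ _
        (fun t j => ((occ.getD j.toNat []).map (fun ck => (ck.1, j))).foldl
            (fun t p => t.modify p.1 [] (fun l => l ++ [p.2])) t) _ (by
          intro acc x _
          simp [List.foldl_map])]
  rw [← List.foldl_flatMap]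
  rw [PySem.Dict.getD_foldl_modify_append]
  simp only [PySem.Dict.getD_empty, List.nil_append]
  constructor
  · intro hmem
    obtain ⟨p, hp, hpj⟩ := List.mem_map.1 hmem
    have hp' := List.mem_filter.1 hp
    obtain ⟨a, ha, hmm⟩ := List.mem_flatMap.1 hp'.1
    obtain ⟨ck, hck, hpeq⟩ := List.mem_map.1 hmm
    have hac := PySem.List.mem_pyRange_one.1 ha
    subst hpeq
    have hc : ck.1 = c := by simpa using hp'.2
    have hja : a = j := hpj
    subst hja
    exact ⟨hac.1, hac.2, ck.2, by rw [← hc]; exact hck⟩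
  · rintro ⟨h0, hm, k, hk⟩
    apply List.mem_map.2
    refine ⟨(c, j), List.mem_filter.2 ⟨?_, by simp⟩, rfl⟩
    apply List.mem_flatMap.2
    refine ⟨j, PySem.List.mem_pyRange_one.2 ⟨h0, hm⟩, ?_⟩
    exact List.mem_map.2 ⟨(c, k), hk, rfl⟩


-- (C17) a fold of writes whose value depends only on the index, pointwise
theorem pv_setfold_getElem (J : List Int) (v : Int → Int) (sc : List Int)
    (hb : ∀ j ∈ J, 0 ≤ j ∧ j < (sc.length : Int)) (i : Nat) :
    (J.foldl (fun sc j => sc.set j.toNat (v j)) sc)[i]?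
      = if (i : Int) ∈ J then some (v (i : Int)) else sc[i]? := by
  induction J generalizing sc with
  | nil => simp
  | cons j t ih =>
    simp only [List.foldl_cons]
    have hj := hb j List.mem_cons_self
    have hrest : ∀ x ∈ t, 0 ≤ x ∧ x < ((sc.set j.toNat (v j)).length : Int) := by
      intro x hx
      have := hb x (List.mem_cons_of_mem _ hx)
      simpa [List.length_set] using this
    rw [ih _ hrest]
    by_cases hmem : (i : Int) ∈ t
    · simp [hmem]
    · simp only [if_neg hmem]
      by_cases heq : j = (i : Int)
      · subst heq
        have hlt : i < sc.length := by
          have := hj.2; omega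
        simp [hlt, List.mem_cons]
      · have hne : j.toNat ≠ i := by omega
        have hnotin : (i : Int) ∉ j :: t := by
          intro hmm
          rcases List.mem_cons.1 hmm with hcase | hcase
          · exact heq hcase.symm
          · exact hmem hcase
        rw [if_neg hnotin, List.getElem?_set, if_neg hne]


-- (C18) after a press, the rescoring pass restores 'scores j = A-score of the new rem'
theorem pv_rescore_bridge (n : Int) (be : List (List Int)) (b : Int)
    (h0 : 0 ≤ b) (hbm : b < (be.length : Int)) (rem : List Int) (hn : (rem.length : Int) = n) :
    pvB_rescore (pvOcc n be) (pvB_touch (be.length : Int) (pvOcc n be))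
        (pvB_pressRem ((pvOcc n be).getD b.toNat []) (rem.map pvClamp)).2
        ((pvA_press n rem (be.getD b.toNat [])).map pvClamp)
        (pvScores n (be.length : Int) rem be)
      = pvScores n (be.length : Int) (pvA_press n rem (be.getD b.toNat [])) be := by
  have hlenA : (pvA_press n rem (be.getD b.toNat [])).length = rem.length :=
    pv_length_pressA n rem _
  have hnA : ((pvA_press n rem (be.getD b.toNat [])).length : Int) = n := by
    rw [hlenA]; exact hn
  have hslen : ∀ rm : List Int, (pvScores n (be.length : Int) rm be).length = be.length := by
    intro rm
    unfold pvScores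
    rw [List.length_map, PySem.List.length_pyRange_one]
    omega
  have hsget : ∀ (rm : List Int) (k : Nat), k < be.length →
      (pvScores n (be.length : Int) rm be)[k]? = some (pvA_score n rm (be.getD k [])) := by
    intro rm k hk
    unfold pvScores
    rw [PySem.List.pyRange_one, List.map_map, List.getElem?_map, List.getElem?_range (by omega)]
    simp
  unfold pvB_rescore
  rw [← List.foldl_flatMap
        (f := fun c => (pvB_touch (be.length : Int) (pvOcc n be)).getD c [])
        (g := fun (sc : List Int) j2 => sc.set j2.toNat
          (pvB_score (pvOcc n be) ((pvA_press n rem (be.getD b.toNat [])).map pvClamp) j2))]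
  have hbJ : ∀ j ∈ (pvB_pressRem ((pvOcc n be).getD b.toNat []) (rem.map pvClamp)).2.flatMap
      (fun c => (pvB_touch (be.length : Int) (pvOcc n be)).getD c []),
      0 ≤ j ∧ j < ((pvScores n (be.length : Int) rem be).length : Int) := by
    intro j hj
    obtain ⟨c, _, hjt⟩ := List.mem_flatMap.1 hj
    have := (pv_mem_touch _ _ c j).1 hjt
    rw [hslen rem]
    exact ⟨this.1, this.2.1⟩
  apply List.ext_getElem?
  intro i
  rw [pv_setfold_getElem _ _ _ hbJ i]
  by_cases hilen : i < be.length
  · have hrhs := hsget (pvA_press n rem (be.getD b.toNat [])) i hilen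
    rw [hrhs]
    by_cases hmem : (i : Int) ∈ (pvB_pressRem ((pvOcc n be).getD b.toNat []) (rem.map pvClamp)).2.flatMap
        (fun c => (pvB_touch (be.length : Int) (pvOcc n be)).getD c [])
    · rw [if_pos hmem]
      have := pv_score_bridge n be (pvA_press n rem (be.getD b.toNat [])) hnA (i : Int)
        (by omega) (by omega)
      rw [this, Int.toNat_natCast]
    · rw [if_neg hmem, hsget rem i hilen]
      congr 1
      rw [pv_scoreA_eq, pv_scoreA_eq]
      congr 1
      apply List.countP_congr
      intro c hcmem
      have hcv : 0 ≤ c ∧ c < n := by simpa using (List.mem_filter.1 hcmem).2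
      have hclt : c.toNat < rem.length := by omega
      have hgA := pv_pressA_getElem n (be.getD b.toNat []) rem hn c.toNat
      have hsome : rem[c.toNat]? = some (rem.getD c.toNat 0) := by
        rw [List.getD_eq_getElem?_getD, List.getElem?_eq_getElem hclt]; rfl
      rw [hsome] at hgA
      have hval : (pvA_press n rem (be.getD b.toNat [])).getD c.toNat 0
          = pvDec^[(pvLv n (be.getD b.toNat [])).count ((c.toNat : Nat) : Int)] (rem.getD c.toNat 0) := by
        rw [List.getD_eq_getElem?_getD, hgA]; rfl
      simp only [decide_eq_true_eq]
      rw [hval]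
      constructor
      · intro hold
        by_contra hnot
        have hdrop : ¬ 0 < (pvA_press n rem (be.getD b.toNat [])).getD c.toNat 0 := by
          rw [hval]; exact hnot
        have hcov := pv_crossed_cover n be b h0 hbm rem hn c.toNat hclt hold hdrop
        have hcc : ((c.toNat : Nat) : Int) = c := by omega
        rw [hcc] at hcov
        have hcio : ∃ k, (c, k) ∈ (pvOcc n be).getD ((i : Int)).toNat [] := by
          rw [Int.toNat_natCast, pv_occ_getD n be i hilen, pv_occ1_items]
          exact ⟨_, List.mem_map.2 ⟨c, PySem.Set.mem_ofList _ _ |>.2 hcmem, rfl⟩⟩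
        exact hmem (List.mem_flatMap.2 ⟨c, hcov,
          (pv_mem_touch _ _ c (i : Int)).2 ⟨by omega, by omega, hcio⟩⟩)
      · intro hnew
        exact pv_decIter_pos _ _ hnew
  · rw [if_neg (fun hmm => by
        have := hbJ _ hmm
        rw [hslen rem] at this
        omega)]
    rw [List.getElem?_eq_none_iff.2 (by rw [hslen rem]; omega),
        List.getElem?_eq_none_iff.2 (by rw [hslen (pvA_press n rem (be.getD b.toNat []))]; omega)]


-- (C20) incrementing one cell increments the sum
theorem pv_sum_set (l : List Int) (b : Nat) (hb : b < l.length) :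
    (l.set b (l.getD b 0 + 1)).sum = l.sum + 1 := by
  rw [List.sum_set]
  have hdrop : l.drop b = l[b] :: l.drop (b + 1) := List.drop_eq_getElem_cons hb
  have hsum : l.sum = (l.take b).sum + (l[b] + (l.drop (b + 1)).sum) := by
    conv_lhs => rw [← List.take_append_drop b l]
    rw [List.sum_append, hdrop, List.sum_cons]
  have hgd : l.getD b 0 = l[b] := List.getD_eq_getElem l 0 hb
  rw [hgd, if_pos hb, hsum]
  ring


-- (C22) the two loops agree step by step
theorem pv_loop_bridge (tc : List Int) (be : List (List Int)) :
    ∀ (fuel : Nat) (remA presses : List Int) (it : Int),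
      remA.length = tc.length → presses.length = be.length →
      pvA_loop (tc.length : Int) (be.length : Int) (tc.sum * 3) be fuel remA presses it
        = pvB_loop (be.length : Int) (tc.sum * 3) (pvOcc (tc.length : Int) be)
            (pvB_touch (be.length : Int) (pvOcc (tc.length : Int) be)) fuel
            (remA.map pvClamp) (pvScores (tc.length : Int) (be.length : Int) remA be)
            presses.sum it := by
  intro fuel
  induction fuel with
  | zero =>
    intro remA presses it hA hP
    simp only [pvA_loop, pvB_loop, pv_any_clamp]
  | succ k ih =>
    intro remA presses it hA hP
    simp only [pvA_loop, pvB_loop, pv_any_clamp]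
    by_cases hcond : remA.any (fun r => 0 < r) = true ∧ it < tc.sum * 3
    · rw [if_pos hcond, if_pos hcond, if_neg (pv_maxRem_ne remA hcond.1)]
      have hnlen : (remA.length : Int) = (tc.length : Int) := by rw [hA]
      have hbb : pvB_best (be.length : Int)
            (pvScores (tc.length : Int) (be.length : Int) remA be)
          = pvA_best (tc.length : Int) (be.length : Int) remA be :=
        pv_best_bridge _ _ _
      rw [hbb]
      have hcases : pvA_best (tc.length : Int) (be.length : Int) remA be = (-1, -1)
          ∨ ∃ j ∈ PySem.List.pyRange 0 (be.length : Int) 1,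
              pvA_best (tc.length : Int) (be.length : Int) remA be
                = (j, pvA_score (tc.length : Int) remA (be.getD j.toNat [])) :=
        pv_best_cases (PySem.List.pyRange 0 (be.length : Int) 1)
          (fun j => pvA_score (tc.length : Int) remA (be.getD j.toNat [])) (-1, -1)
      rcases hcases with hinit | ⟨j, hjmem, hjeq⟩
      · rw [hinit]
        norm_num
      · have hjb := PySem.List.mem_pyRange_one.1 hjmem
        have hnn := pv_scoreA_nonneg (tc.length : Int) remA (be.getD j.toNat [])
        rw [hjeq]
        dsimp only
        by_cases hz : pvA_score (tc.length : Int) remA (be.getD j.toNat []) = 0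
        · rw [if_pos (Or.inr hz), if_pos (by omega)]
        · rw [if_neg (by
              rintro (h1 | h2)
              · omega
              · exact hz h2),
            if_neg (by omega)]
          have hjp : j.toNat < presses.length := by rw [hP]; omega
          have hih := ih (pvA_press (tc.length : Int) remA (be.getD j.toNat []))
            (presses.set j.toNat (presses.getD j.toNat 0 + 1)) (it + 1)
            (by rw [pv_length_pressA]; exact hA)
            (by rw [List.length_set]; exact hP)
          rw [pv_sum_set presses j.toNat hjp] at hih
          rw [pv_press_bridge (tc.length : Int) be j hjb.1 hjb.2 remA hnlen]
          rw [pv_rescore_bridge (tc.length : Int) be j hjb.1 hjb.2 remA hnlen]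
          exact hih
    · rw [if_neg hcond, if_neg hcond]


-- ===== VERDICT (by name: the statement is the Claim_ definition above) =====
theorem solve_greedy_fallback_spec : Claim_equal_solve_greedy_fallback := by
  intro tc be _
  unfold Spec_solve_greedy_fallback solve_greedy_fallback solve_greedy_fallback_alt
  have hinit := pv_loop_bridge tc be (tc.sum * 3).toNat tc (List.replicate be.length 0) 0
    rfl (List.length_replicate)
  simp only [List.sum_replicate, smul_zero] at hinit
  rw [hinit]
  dsimp only
  have hsc : (PySem.List.pyRange 0 (be.length : Int) 1).map
        (pvB_score (be.map (fun eff => (pvB_occ1 (tc.length : Int) eff).items))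
          (tc.map (fun t => if 0 < t then t else 0)))
      = pvScores (tc.length : Int) (be.length : Int) tc be := by
    apply List.map_congr_left
    intro j hj
    have hjb := PySem.List.mem_pyRange_one.1 hj
    exact pv_score_bridge (tc.length : Int) be tc rfl j hjb.1 hjb.2
  rw [hsc]
  rfl
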